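-- pv_equiv track=rewrite | github.com/Y2ktorrez/Python | multiplessoluciones.py | sumaProd
-- ===== SOURCE A (Python) =====
-- def sumaProd(n) :
-- 	c = 1
-- 	sum = 0
-- 	v = n
-- 	while (c <= n):
-- 		sum = sum + v*c
-- 		v = v - 1
-- 		c = c + 1
-- 	return sum
-- ===== SOURCE B (Python) =====
-- def sumaProd(n):
--     # closed form: sum_{c=1..n} (n+1-c)*c = n*(n+1)*(n+2)//6
--     if n <= 0:
--         return 0
--     return n * (n + 1) * (n + 2) // 6
-- ===== Notes on version B (the rewrite author's own statement) =====
-- stated objective: faster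
-- what changed: Replaced the O(n) while-loop accumulation with the closed-form polynomial n*(n+1)*(n+2)//6 (0 for n<=0).
import Mathlib
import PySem

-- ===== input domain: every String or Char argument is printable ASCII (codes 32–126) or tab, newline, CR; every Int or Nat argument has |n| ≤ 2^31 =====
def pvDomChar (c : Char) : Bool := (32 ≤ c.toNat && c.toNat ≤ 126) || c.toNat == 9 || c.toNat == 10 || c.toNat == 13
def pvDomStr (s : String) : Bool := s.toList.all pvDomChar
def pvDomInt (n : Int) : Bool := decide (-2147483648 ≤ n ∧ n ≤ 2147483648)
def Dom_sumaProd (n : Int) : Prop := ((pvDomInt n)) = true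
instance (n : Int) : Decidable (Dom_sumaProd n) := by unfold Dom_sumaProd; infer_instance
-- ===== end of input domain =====

-- B replaces A's O(n) accumulation loop with the closed-form polynomial n*(n+1)*(n+2)//6 (faster, asymptotic).


-- ===== PORT A =====
-- literal port of A's while-loop: state (c, v, sum), loop while c ≤ n
def sumaProdGo (n c v sum : Int) : Int :=
  if c ≤ n then sumaProdGo n (c + 1) (v - 1) (sum + v * c) else sum
termination_by (n + 1 - c).toNat
decreasing_by omega

def sumaProd (n : Int) : Int := sumaProdGo n 1 n 0

-- ===== PORT B =====
def sumaProd_alt (n : Int) : Int :=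
  if n ≤ 0 then 0 else PySem.Int.floordiv (n * (n + 1) * (n + 2)) 6

-- ===== PRECONDITION & SPEC =====
def Spec_sumaProd (n : Int) (out : Int) : Prop := out = sumaProd_alt n
instance (n : Int) (out : Int) : Decidable (Spec_sumaProd n out) := by unfold Spec_sumaProd; infer_instance

-- ===== CLAIM (what is proved, stated in full; the proofs are below) =====
def Claim_equal_sumaProd : Prop := ∀ (n : Int), Dom_sumaProd n → Spec_sumaProd n (sumaProd n)

-- ===== LEMMAS AND PROOFS =====

-- g n k = value of the loop's remaining accumulation when k iterations remain
def pvG (n : Int) : Nat → Int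
  | 0 => 0
  | k + 1 => (k + 1) * (n - k) + pvG n k

theorem pvGo_eq_g (n : Int) (k : Nat) : ∀ s : Int, sumaProdGo n (n + 1 - k) k s = s + pvG n k := by
  induction k with
  | zero =>
      intro s
      rw [sumaProdGo]
      simp [pvG]
  | succ k ih =>
      intro s
      rw [sumaProdGo, if_pos (by push_cast; omega),
        show (n + 1 - ((k + 1 : Nat) : Int) + 1) = n + 1 - (k : Nat) from by push_cast; ring,
        show (((k + 1 : Nat) : Nat) : Int) - 1 = ((k : Nat) : Int) from by push_cast; ring, ih]
      simp [pvG]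
      ring

theorem pvG_closed (n : Int) (k : Nat) :
    6 * pvG n k = 3 * (n + 1) * k * (k + 1) - k * (k + 1) * (2 * k + 1) := by
  induction k with
  | zero => simp [pvG]
  | succ k ih =>
      rw [pvG]
      push_cast
      push_cast at ih
      linarith [ih]

-- ===== VERDICT (by name: the statement is the Claim_ definition above) =====
theorem sumaProd_spec : Claim_equal_sumaProd := by
  intro n _
  unfold Spec_sumaProd sumaProd sumaProd_alt
  by_cases hn : n ≤ 0
  · rw [if_pos hn, sumaProdGo, if_neg (by omega)]
  · rw [if_neg hn]
    have hk : (n.toNat : Int) = n := Int.toNat_of_nonneg (by omega)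
    have hgo : sumaProdGo n 1 n 0 = pvG n n.toNat := by
      have h := pvGo_eq_g n n.toNat 0
      rw [hk, show n + 1 - n = (1 : Int) from by ring, zero_add] at h
      exact h
    rw [hgo]
    have hc := pvG_closed n n.toNat
    rw [hk] at hc
    have h6 : n * (n + 1) * (n + 2) = 6 * pvG n n.toNat := by rw [hc]; ring
    rw [h6, PySem.Int.floordiv_eq_ediv_of_pos (by omega), Int.mul_ediv_cancel_left _ (by norm_num)]
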